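-- pv_equiv track=rewrite | github.com/try918925/2024223 | OCR_TOOL/ocr.py | code_95_half
-- ===== SOURCE A (Python) =====
-- p0_list = ['2', '4', 'L']
--
-- p1_list = ['2', '5', 'C', 'F']
--
-- p2_list = ['G', 'R', 'U', 'P', 'T', 'V', 'K', '1']
--
-- p3_list = ['0', '1', '2', '3', '4', '5', '6', '7', '8', '9', 'X', 'B']
--
-- def code_95_half(code):
--     if len(code) >= 4:
--         return False
--     p_list = [p0_list, p1_list, p2_list, p3_list]
--
--     if len(code) == 3:
--         for i in range(2):
--             if code[0] in p_list[i] and code[1] in p_list[1 + i] and code[2] in p_list[2 + i]: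
--                 return True
--     elif len(code) == 2:
--         for i in range(3):
--             if code[0] in p_list[i] and code[1] in p_list[1 + i]:
--                 return True
--     elif len(code) == 1:
--         for i in range(4):
--             if code in p_list[i]:
--                 return True
--     return False
-- ===== SOURCE B (Python) =====
-- p0_list = ['2', '4', 'L']
-- p1_list = ['2', '5', 'C', 'F']
-- p2_list = ['G', 'R', 'U', 'P', 'T', 'V', 'K', '1']
-- p3_list = ['0', '1', '2', '3', '4', '5', '6', '7', '8', '9', 'X', 'B']
--
-- # Precomputed once: for each character, the bitmask of positions (0..3) where it may occur.
-- _CHAR_POS = {}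
-- _k = 0
-- for _lst in (p0_list, p1_list, p2_list, p3_list):
--     for _ch in _lst:
--         _CHAR_POS[_ch] = _CHAR_POS.get(_ch, 0) | (1 << _k)
--     _k += 1
--
-- def code_95_half(code):
--     if not 0 < len(code) < 4:
--         return False
--     # bit i of m stays set iff every code[j] is allowed at position i+j
--     m = 0b1111
--     j = 0
--     for ch in code:
--         m &= _CHAR_POS.get(ch, 0) >> j
--         j += 1
--     return m != 0
-- ===== Notes on version B (the rewrite author's own statement) =====
-- stated objective: alternative
-- what changed: Replaces A's three hardcoded length branches of positional membership tests by a precomputed per-character position-bitmask dictionary; the code is valid iff the bitwise AND of the shifted masks of its characters is nonzero, so no offset/window loop or membership scan remains in the function.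
import Mathlib
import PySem

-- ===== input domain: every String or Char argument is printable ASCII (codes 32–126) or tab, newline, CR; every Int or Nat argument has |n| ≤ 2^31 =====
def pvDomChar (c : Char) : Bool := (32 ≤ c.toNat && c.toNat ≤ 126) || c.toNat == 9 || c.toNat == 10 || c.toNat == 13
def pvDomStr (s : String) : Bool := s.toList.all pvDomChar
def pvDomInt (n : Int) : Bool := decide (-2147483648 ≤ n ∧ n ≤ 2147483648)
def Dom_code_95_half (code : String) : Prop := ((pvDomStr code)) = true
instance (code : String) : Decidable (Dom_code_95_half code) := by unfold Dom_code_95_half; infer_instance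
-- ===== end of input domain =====

-- B replaces A's three hardcoded length branches of positional membership tests with a
-- precomputed per-character position-bitmask dictionary and a bitwise AND of shifted
-- masks (objective: alternative). Equivalence is proved on all inputs (both are total).
-- The Python p-lists hold only one-character strings, so membership of code[j] (a
-- one-character string) is ported exactly as Char membership (List.contains), and the
-- nonnegative Python int masks are ported as Nat.

-- ===== PORT A =====
def p0_list : List Char := ['2', '4', 'L']
def p1_list : List Char := ['2', '5', 'C', 'F']
def p2_list : List Char := ['G', 'R', 'U', 'P', 'T', 'V', 'K', '1']
def p3_list : List Char := ['0', '1', '2', '3', '4', '5', '6', '7', '8', '9', 'X', 'B']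

-- A on the character list; each `for … return True` loop is List.any over the same range
def code_95_half_list (cs : List Char) : Bool :=
  if cs.length ≥ 4 then false
  else
    let p_list := [p0_list, p1_list, p2_list, p3_list]
    if cs.length = 3 then
      (List.range 2).any (fun i =>
        (p_list.getD i []).contains (cs.getD 0 ' ') &&
        (p_list.getD (1 + i) []).contains (cs.getD 1 ' ') &&
        (p_list.getD (2 + i) []).contains (cs.getD 2 ' '))
    else if cs.length = 2 then
      (List.range 3).any (fun i =>
        (p_list.getD i []).contains (cs.getD 0 ' ') &&
        (p_list.getD (1 + i) []).contains (cs.getD 1 ' '))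
    else if cs.length = 1 then
      (List.range 4).any (fun i => (p_list.getD i []).contains (cs.getD 0 ' '))
    else false

def code_95_half (code : String) : Bool := code_95_half_list code.toList

-- ===== PORT B =====
-- module-level precomputation: for each char, the bitmask of positions 0..3 allowing it
def charPos : PySem.Dict Char Nat :=
  ([p0_list, p1_list, p2_list, p3_list].foldl
    (fun (p : PySem.Dict Char Nat × Nat) lst =>
      (lst.foldl (fun d ch => d.insert ch (d.getD ch 0 ||| (1 <<< p.2))) p.1, p.2 + 1))
    (PySem.Dict.empty, 0)).1

-- B on the character list: AND the shifted per-character masks, test for nonzero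
def code_95_half_alt_list (cs : List Char) : Bool :=
  if !(0 < cs.length && cs.length < 4) then false
  else
    let mj := cs.foldl (fun (p : Nat × Nat) ch =>
      (p.1 &&& (charPos.getD ch 0 >>> p.2), p.2 + 1)) (15, 0)
    mj.1 != 0

def code_95_half_alt (code : String) : Bool := code_95_half_alt_list code.toList

-- ===== PRECONDITION & SPEC =====
def Spec_code_95_half (code : String) (out : Bool) : Prop := out = code_95_half_alt code
instance (code : String) (out : Bool) : Decidable (Spec_code_95_half code out) := by unfold Spec_code_95_half; infer_instance

-- ===== CLAIM =====
def Claim_equal_code_95_half : Prop := ∀ (code : String), Dom_code_95_half code → Spec_code_95_half code (code_95_half code)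
set_option maxHeartbeats 1000000 in
theorem charPos_lit : charPos = PySem.Dict.mk [('2', 11), ('4', 9), ('L', 1), ('5', 10), ('C', 2), ('F', 2), ('G', 4), ('R', 4), ('U', 4), ('P', 4), ('T', 4), ('V', 4), ('K', 4), ('1', 12), ('0', 8), ('3', 8), ('6', 8), ('7', 8), ('8', 8), ('9', 8), ('X', 8), ('B', 8)] := by rfl
set_option maxHeartbeats 1000000 in
theorem charPos_getD (c : Char) :
    charPos.getD c 0 =
      (cond (decide (c ∈ p0_list)) 1 0) ||| (cond (decide (c ∈ p1_list)) 2 0) |||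
      (cond (decide (c ∈ p2_list)) 4 0) ||| (cond (decide (c ∈ p3_list)) 8 0) := by
  rw [charPos_lit]
  by_cases h0 : '2' = c
  · subst h0; rfl
  by_cases h1 : '4' = c
  · subst h1; rfl
  by_cases h2 : 'L' = c
  · subst h2; rfl
  by_cases h3 : '5' = c
  · subst h3; rfl
  by_cases h4 : 'C' = c
  · subst h4; rfl
  by_cases h5 : 'F' = c
  · subst h5; rfl
  by_cases h6 : 'G' = c
  · subst h6; rfl
  by_cases h7 : 'R' = c
  · subst h7; rfl
  by_cases h8 : 'U' = c
  · subst h8; rfl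
  by_cases h9 : 'P' = c
  · subst h9; rfl
  by_cases h10 : 'T' = c
  · subst h10; rfl
  by_cases h11 : 'V' = c
  · subst h11; rfl
  by_cases h12 : 'K' = c
  · subst h12; rfl
  by_cases h13 : '1' = c
  · subst h13; rfl
  by_cases h14 : '0' = c
  · subst h14; rfl
  by_cases h15 : '3' = c
  · subst h15; rfl
  by_cases h16 : '6' = c
  · subst h16; rfl
  by_cases h17 : '7' = c
  · subst h17; rfl
  by_cases h18 : '8' = c
  · subst h18; rfl
  by_cases h19 : '9' = c
  · subst h19; rfl
  by_cases h20 : 'X' = c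
  · subst h20; rfl
  by_cases h21 : 'B' = c
  · subst h21; rfl
  simp [PySem.Dict.getD_eq_get?_getD, PySem.Dict.get?_mk_cons, p0_list, p1_list, p2_list, p3_list, h0, Ne.symm h0, h1, Ne.symm h1, h2, Ne.symm h2, h3, Ne.symm h3, h4, Ne.symm h4, h5, Ne.symm h5, h6, Ne.symm h6, h7, Ne.symm h7, h8, Ne.symm h8, h9, Ne.symm h9, h10, Ne.symm h10, h11, Ne.symm h11, h12, Ne.symm h12, h13, Ne.symm h13, h14, Ne.symm h14, h15, Ne.symm h15, h16, Ne.symm h16, h17, Ne.symm h17, h18, Ne.symm h18, h19, Ne.symm h19, h20, Ne.symm h20, h21, Ne.symm h21]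
  rfl

theorem list_eq (cs : List Char) : code_95_half_list cs = code_95_half_alt_list cs := by
  match cs with
  | [] => rfl
  | [a] =>
    simp only [code_95_half_list, code_95_half_alt_list]
    simp [List.range_succ, List.foldl]
    rw [charPos_getD]
    generalize decide (a ∈ p0_list) = b0
    generalize decide (a ∈ p1_list) = b1
    generalize decide (a ∈ p2_list) = b2
    generalize decide (a ∈ p3_list) = b3
    revert b0 b1 b2 b3; decide
  | [a, b] =>
    simp only [code_95_half_list, code_95_half_alt_list]
    simp [List.range_succ, List.foldl]
    rw [charPos_getD a, charPos_getD b]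
    generalize decide (a ∈ p0_list) = a0
    generalize decide (a ∈ p1_list) = a1
    generalize decide (a ∈ p2_list) = a2
    generalize decide (a ∈ p3_list) = a3
    generalize decide (b ∈ p0_list) = c0
    generalize decide (b ∈ p1_list) = c1
    generalize decide (b ∈ p2_list) = c2
    generalize decide (b ∈ p3_list) = c3
    revert a0 a1 a2 a3 c0 c1 c2 c3; decide
  | [a, b, c] =>
    simp only [code_95_half_list, code_95_half_alt_list]
    simp [List.range_succ, List.foldl]
    rw [charPos_getD a, charPos_getD b, charPos_getD c]
    generalize decide (a ∈ p0_list) = a0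
    generalize decide (a ∈ p1_list) = a1
    generalize decide (a ∈ p2_list) = a2
    generalize decide (a ∈ p3_list) = a3
    generalize decide (b ∈ p0_list) = c0
    generalize decide (b ∈ p1_list) = c1
    generalize decide (b ∈ p2_list) = c2
    generalize decide (b ∈ p3_list) = c3
    generalize decide (c ∈ p0_list) = d0
    generalize decide (c ∈ p1_list) = d1
    generalize decide (c ∈ p2_list) = d2
    generalize decide (c ∈ p3_list) = d3
    revert a0 a1 a2 a3 c0 c1 c2 c3 d0 d1 d2 d3; decide
  | a :: b :: c :: d :: t =>
    simp [code_95_half_list, code_95_half_alt_list]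

-- ===== VERDICT =====
theorem code_95_half_spec : Claim_equal_code_95_half := by
  intro code _
  unfold Spec_code_95_half code_95_half code_95_half_alt
  exact list_eq code.toList
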